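-- pv_equiv track=rewrite | github.com/KongLongGeFDU/TaxoBench | metric/ted.py | _compute_keyroots
-- ===== SOURCE A (Python) =====
-- from typing import Dict, List, Optional, Tuple
--
-- def _compute_keyroots(l: List[int]) -> List[int]:
--     """
--     Returns the "last occurrence" position of each leftmost leaf index, ensuring root node is included.
--     Zhang-Shasha requires keyroots to select the rightmost occurrence node, otherwise treedist[m-1][n-1]
--     may remain inf (root not processed).
--     """
--     keyroots: List[int] = []
--     seen = set()
--     # Reverse order first occurrence = forward order last occurrence
--     for i in range(len(l) - 1, -1, -1):
--         left = l[i]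
--         if left not in seen:
--             keyroots.append(i)
--             seen.add(left)
--     keyroots.reverse()
--     return keyroots
-- ===== SOURCE B (Python) =====
-- from typing import Dict, List, Optional, Tuple
--
-- def _compute_keyroots(l: List[int]) -> List[int]:
--     # One forward pass: `last` maps each value to its last (most recent) index.
--     last: Dict[int, int] = {}
--     for i, v in enumerate(l):
--         last[v] = i
--     # The last-occurrence indices, in ascending order.
--     return sorted(last.values())
-- ===== Notes on version B (the rewrite author's own statement) =====
-- stated objective: simpler
-- what changed: Replaces A's membership-gated reverse scan with seen-set plus final reverse() by a single forward pass building a value->last-index dict (unconditional overwrite, no membership guard) followed by sorting the dict's values.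
import Mathlib
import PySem

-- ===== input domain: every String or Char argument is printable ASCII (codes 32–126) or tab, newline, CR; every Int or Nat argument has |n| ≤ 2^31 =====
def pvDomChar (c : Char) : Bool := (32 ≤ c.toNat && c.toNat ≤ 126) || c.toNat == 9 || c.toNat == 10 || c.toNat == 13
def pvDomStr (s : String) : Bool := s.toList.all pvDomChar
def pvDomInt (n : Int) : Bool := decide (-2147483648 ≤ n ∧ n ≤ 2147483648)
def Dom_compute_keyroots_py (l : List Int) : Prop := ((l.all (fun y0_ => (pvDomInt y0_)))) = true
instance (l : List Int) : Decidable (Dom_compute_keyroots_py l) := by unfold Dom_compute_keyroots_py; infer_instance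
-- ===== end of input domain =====

-- B replaces A's seen-set-gated reverse scan (+ final reverse()) by a forward pass building a
-- value -> last-index dict and sorting its values; objective: simpler.

-- ===== PORT A =====
def compute_keyroots_py (l : List Int) : List Int :=
  ((PySem.List.pyRange ((l.length : Int) - 1) (-1) (-1)).foldl
    (fun (st : List Int × PySem.Set Int) i =>
      match PySem.List.pyGet? l i with
      | none => st  -- unreachable: every i produced by the range is a valid index
      | some left =>
        if PySem.Set.contains st.2 left then st
        else (st.1 ++ [i], PySem.Set.add st.2 left))
    ([], PySem.Set.empty)).1.reverse

-- ===== PORT B =====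
def compute_keyroots_py_alt (l : List Int) : List Int :=
  PySem.List.sorted
    (PySem.Dict.values ((PySem.List.enumerate l).foldl
      (fun (d : PySem.Dict Int Int) p => d.insert p.2 p.1) PySem.Dict.empty))
    (fun x => x) false

-- ===== PRECONDITION & SPEC =====
def Spec_compute_keyroots_py (l : List Int) (out : List Int) : Prop := out = compute_keyroots_py_alt l
instance (l : List Int) (out : List Int) : Decidable (Spec_compute_keyroots_py l out) := by unfold Spec_compute_keyroots_py; infer_instance

-- ===== CLAIM (what is proved, stated in full; the proofs are below) =====
def Claim_equal_compute_keyroots_py : Prop := ∀ (l : List Int), Dom_compute_keyroots_py l → Spec_compute_keyroots_py l (compute_keyroots_py l)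

-- ===== LEMMAS AND PROOFS =====

-- Abstract form of A's loop: process indices a-1, …, 0 with seen-list s, collecting (descending)
-- the indices whose value is fresh.
def aLoop (l : List Int) (s : List Int) : Nat → List Nat
  | 0 => []
  | a + 1 =>
    if l.getD a 0 ∈ s then aLoop l s a else a :: aLoop l (l.getD a 0 :: s) a

theorem aLoop_congr (l : List Int) (s t : List Int) (h : ∀ x, x ∈ s ↔ x ∈ t) :
    ∀ a, aLoop l s a = aLoop l t a := by
  intro a
  induction a generalizing s t with
  | zero => rfl
  | succ a ih =>
    simp only [aLoop]
    by_cases hv : l.getD a 0 ∈ s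
    · rw [if_pos hv, if_pos ((h _).1 hv), ih s t h]
    · rw [if_neg hv, if_neg (fun hc => hv ((h _).2 hc))]
      have hst : ∀ x, x ∈ l.getD a 0 :: s ↔ x ∈ l.getD a 0 :: t := by
        intro x; simp [h x]
      rw [ih _ _ hst]

theorem aLoop_mem (l : List Int) : ∀ (a : Nat) (s : List Int) (k : Nat),
    k ∈ aLoop l s a ↔
      k < a ∧ l.getD k 0 ∉ s ∧ ∀ j : Nat, k < j → j < a → l.getD j 0 ≠ l.getD k 0 := by
  intro a
  induction a with
  | zero => intro s k; simp [aLoop]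
  | succ a ih =>
    intro s k
    simp only [aLoop]
    by_cases hv : l.getD a 0 ∈ s
    · rw [if_pos hv, ih]
      constructor
      · rintro ⟨hk, hns, hall⟩
        refine ⟨by omega, hns, ?_⟩
        intro j hj1 hj2
        by_cases hja : j = a
        · subst hja; intro he; exact hns (he ▸ hv)
        · exact hall j hj1 (by omega)
      · rintro ⟨hk, hns, hall⟩
        have hka : k ≠ a := by rintro rfl; exact hns hv
        exact ⟨by omega, hns, fun j h1 h2 => hall j h1 (by omega)⟩
    · rw [if_neg hv]
      constructor
      · intro hmem
        rcases List.mem_cons.1 hmem with rfl | hmem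
        · exact ⟨by omega, hv, fun j h1 h2 => by omega⟩
        · rcases (ih _ _).1 hmem with ⟨hk, hns, hall⟩
          simp only [List.mem_cons] at hns
          push Not at hns
          refine ⟨by omega, hns.2, ?_⟩
          intro j hj1 hj2
          by_cases hja : j = a
          · subst hja; exact fun he => hns.1 he.symm
          · exact hall j hj1 (by omega)
      · rintro ⟨hk, hns, hall⟩
        by_cases hka : k = a
        · subst hka; exact List.mem_cons_self
        · refine List.mem_cons.2 (Or.inr ((ih _ _).2 ⟨by omega, ?_, ?_⟩))
          · simp only [List.mem_cons]
            push Not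
            exact ⟨fun he => hall a (by omega) (by omega) he.symm, hns⟩
          · exact fun j h1 h2 => hall j h1 (by omega)

theorem aLoop_desc (l : List Int) : ∀ (a : Nat) (s : List Int),
    (aLoop l s a).Pairwise (fun x y => y < x) := by
  intro a
  induction a with
  | zero => intro s; simp [aLoop]
  | succ a ih =>
    intro s
    simp only [aLoop]
    split
    · exact ih s
    · refine List.pairwise_cons.2 ⟨?_, ih _⟩
      intro y hy
      exact ((aLoop_mem l a _ y).1 hy).1

theorem set_contains_iff (s : PySem.Set Int) (x : Int) :
    PySem.Set.contains s x = true ↔ x ∈ s := by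
  simp [PySem.Set.contains]

-- A's foldl over the countdown range is aLoop (the seen set read through membership only).
theorem aLoop_foldl (l : List Int) : ∀ (a : Nat), a ≤ l.length → ∀ (ks : List Int) (s : PySem.Set Int),
    ((PySem.List.pyRange ((a : Int) - 1) (-1) (-1)).foldl
      (fun (st : List Int × PySem.Set Int) i =>
        match PySem.List.pyGet? l i with
        | none => st
        | some left =>
          if PySem.Set.contains st.2 left then st
          else (st.1 ++ [i], PySem.Set.add st.2 left))
      (ks, s)).1 = ks ++ (aLoop l s a).map (fun k : Nat => (k : Int)) := by
  intro a
  induction a with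
  | zero =>
    intro _ ks s
    rw [show ((0 : Nat) : Int) - 1 = -1 by norm_num]
    rw [PySem.List.pyRange_neg_one_eq_nil le_rfl]
    simp [aLoop]
  | succ a ih =>
    intro ha ks s
    rw [show ((a + 1 : Nat) : Int) - 1 = (a : Int) by push_cast; ring]
    rw [PySem.List.pyRange_neg_one_cons (by omega)]
    have hlt : a < l.length := by omega
    have hget : PySem.List.pyGet? l (a : Int) = some (l.getD a 0) := by
      simp [PySem.List.pyGet?_natCast, List.getElem?_eq_getElem hlt]
    simp only [List.foldl_cons, hget]
    by_cases hv : l.getD a 0 ∈ s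
    · have hc : PySem.Set.contains s (l.getD a 0) = true := (set_contains_iff _ _).2 hv
      simp only [hc, if_true]
      rw [ih (by omega) ks s]
      have hstep : aLoop l s (a + 1) = aLoop l s a := by
        simp only [aLoop]; rw [if_pos hv]
      rw [hstep]
    · have hc : PySem.Set.contains s (l.getD a 0) = false :=
        Bool.eq_false_iff.2 (fun hc => hv ((set_contains_iff _ _).1 hc))
      simp only [hc, Bool.false_eq_true, if_false]
      rw [ih (by omega) (ks ++ [(a : Int)]) (PySem.Set.add s (l.getD a 0))]
      rw [aLoop_congr l (PySem.Set.add s (l.getD a 0)) (l.getD a 0 :: s)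
        (by intro x; rw [PySem.Set.mem_add]; simp [or_comm]) a]
      have hstep : aLoop l s (a + 1) = a :: aLoop l (l.getD a 0 :: s) a := by
        simp only [aLoop]; rw [if_neg hv]
      rw [hstep]
      simp

-- last-occurrence index of v in xs (scanned from the front)
def lastIdx (xs : List Int) (v : Int) : Option Nat :=
  match xs with
  | [] => none
  | x :: t =>
    match lastIdx t v with
    | some j => some (j + 1)
    | none => if x = v then some 0 else none

theorem lastIdx_isSome_of_mem (v : Int) : ∀ (xs : List Int), v ∈ xs → ∃ j, lastIdx xs v = some j := by
  intro xs
  induction xs with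
  | nil => simp
  | cons x t ih =>
    intro hmem
    simp only [lastIdx]
    cases h : lastIdx t v with
    | some j => exact ⟨j + 1, rfl⟩
    | none =>
      rcases List.mem_cons.1 hmem with rfl | hmem
      · exact ⟨0, by simp⟩
      · rcases ih hmem with ⟨j, hj⟩
        rw [h] at hj; simp at hj

theorem lastIdx_eq_some_iff (v : Int) : ∀ (xs : List Int) (j : Nat),
    lastIdx xs v = some j ↔
      j < xs.length ∧ xs.getD j 0 = v ∧ ∀ m : Nat, j < m → m < xs.length → xs.getD m 0 ≠ v := by
  intro xs
  induction xs with
  | nil => intro j; simp [lastIdx]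
  | cons x t ih =>
    intro j
    simp only [lastIdx]
    cases h : lastIdx t v with
    | some i =>
      rcases (ih i).1 h with ⟨hi, hv, hall⟩
      constructor
      · rintro hj
        injection hj with hj; subst hj
        refine ⟨by simpa using Nat.succ_lt_succ hi, by simpa using hv, ?_⟩
        intro m h1 h2
        cases m with
        | zero => omega
        | succ m => simpa using hall m (by omega) (by simpa using h2)
      · rintro ⟨hj, hvj, hall2⟩
        cases j with
        | zero =>
          exfalso
          exact hall2 (i + 1) (by omega) (by simpa using Nat.succ_lt_succ hi) (by simpa using hv)
        | succ j =>
          have hsome : lastIdx t v = some j := (ih j).2 ⟨by simpa using hj, by simpa using hvj,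
            fun m h1 h2 => by simpa using hall2 (m + 1) (by omega) (by simpa using Nat.succ_lt_succ h2)⟩
          rw [h] at hsome; injection hsome with hsome; simp [hsome]
    | none =>
      have hnone : ∀ m : Nat, m < t.length → t.getD m 0 ≠ v := by
        intro m hm he
        have hmemt : v ∈ t := by
          rw [← he, List.getD_eq_getElem t 0 hm]; exact List.getElem_mem hm
        rcases lastIdx_isSome_of_mem v t hmemt with ⟨i, hi⟩
        rw [h] at hi; simp at hi
      by_cases hv : x = v
      · subst hv
        rw [if_pos rfl]
        constructor
        · rintro hj; injection hj with hj; subst hj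
          refine ⟨by simp, by simp, ?_⟩
          intro m h1 h2
          cases m with
          | zero => omega
          | succ m => simpa using hnone m (by simpa using h2)
        · rintro ⟨hj, hvj, _⟩
          cases j with
          | zero => rfl
          | succ j =>
            exfalso
            exact hnone j (by simpa using hj) (by simpa using hvj)
      · simp only [if_neg hv]
        constructor
        · intro hc; simp at hc
        · rintro ⟨hj, hvj, _⟩
          cases j with
          | zero => exact absurd (by simpa using hvj) hv
          | succ j =>
            exfalso
            exact hnone j (by simpa using hj) (by simpa using hvj)

-- B's dict lookup is lastIdx (shifted by the enumerate start).
theorem lastIdx_fold (v : Int) : ∀ (xs : List Int) (st : Int) (d : PySem.Dict Int Int),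
    ((PySem.List.enumerate xs st).foldl
      (fun (d : PySem.Dict Int Int) p => d.insert p.2 p.1) d).get? v
      = match lastIdx xs v with
        | some j => some (st + j)
        | none => d.get? v := by
  intro xs
  induction xs with
  | nil => intro st d; simp [PySem.List.enumerate_nil, lastIdx]
  | cons x t ih =>
    intro st d
    rw [PySem.List.enumerate_cons]
    simp only [List.foldl_cons]
    rw [ih (st + 1) (d.insert x st)]
    simp only [lastIdx]
    cases h : lastIdx t v with
    | some j => simp; ring_nf
    | none =>
      by_cases hv : x = v
      · subst hv; simp [PySem.Dict.get?_insert_self]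
      · rw [PySem.Dict.get?_insert, if_neg (fun h => hv h.symm)]
        simp [hv]

-- the common characterisation: j is the last-occurrence index of its own value
def KeyIdx (l : List Int) (j : Int) : Prop :=
  ∃ k : Nat, j = (k : Int) ∧ k < l.length ∧
    ∀ m : Nat, k < m → m < l.length → l.getD m 0 ≠ l.getD k 0

theorem keyroots_A_eq (l : List Int) :
    compute_keyroots_py l = ((aLoop l [] l.length).map (fun k : Nat => (k : Int))).reverse := by
  unfold compute_keyroots_py
  rw [aLoop_foldl l l.length le_rfl [] PySem.Set.empty]
  rfl

theorem mem_A_iff (l : List Int) (j : Int) :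
    j ∈ compute_keyroots_py l ↔ KeyIdx l j := by
  rw [keyroots_A_eq]
  rw [List.mem_reverse, List.mem_map]
  constructor
  · rintro ⟨k, hk, rfl⟩
    rcases (aLoop_mem l l.length [] k).1 hk with ⟨h1, -, h3⟩
    exact ⟨k, rfl, h1, h3⟩
  · rintro ⟨k, rfl, hk, hall⟩
    exact ⟨k, (aLoop_mem l l.length [] k).2 ⟨hk, by simp, hall⟩, rfl⟩

theorem A_pairwise (l : List Int) : (compute_keyroots_py l).Pairwise (· < ·) := by
  rw [keyroots_A_eq, List.pairwise_reverse, List.pairwise_map]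
  refine (aLoop_desc l l.length []).imp ?_
  intro a b h
  exact_mod_cast h

theorem A_nodup (l : List Int) : (compute_keyroots_py l).Nodup :=
  (A_pairwise l).imp ne_of_lt

-- B's dict and its values
theorem B_getD (l : List Int) (v : Int) (hv : v ∈ l) :
    ∃ k : Nat, lastIdx l v = some k ∧
      ((PySem.List.enumerate l).foldl
        (fun (d : PySem.Dict Int Int) p => d.insert p.2 p.1) PySem.Dict.empty).getD v 0 = (k : Int) := by
  rcases lastIdx_isSome_of_mem v l hv with ⟨k, hk⟩
  refine ⟨k, hk, ?_⟩
  rw [PySem.Dict.getD_eq_get?_getD, lastIdx_fold v l 0 PySem.Dict.empty, hk]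
  simp

theorem B_keys (l : List Int) :
    ((PySem.List.enumerate l).foldl
      (fun (d : PySem.Dict Int Int) p => d.insert p.2 p.1) PySem.Dict.empty).keys
      = PySem.Set.ofList l := by
  rw [PySem.Dict.keys_foldl_insert_key (PySem.List.enumerate l) (fun p => p.2)
    (fun d p => p.1) PySem.Dict.empty]
  simp [PySem.Dict.keys_empty, PySem.List.map_snd_enumerate, PySem.Set.update,
    PySem.Set.ofList_eq_foldl]

theorem B_keys_nodup (l : List Int) :
    ((PySem.List.enumerate l).foldl
      (fun (d : PySem.Dict Int Int) p => d.insert p.2 p.1) PySem.Dict.empty).keys.Nodup := by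
  apply PySem.Dict.nodup_keys_foldl_insert_key
  simp [PySem.Dict.keys_empty]

theorem mem_B_iff (l : List Int) (j : Int) :
    j ∈ ((PySem.List.enumerate l).foldl
      (fun (d : PySem.Dict Int Int) p => d.insert p.2 p.1) PySem.Dict.empty).values ↔ KeyIdx l j := by
  rw [PySem.Dict.values_eq_map_keys _ (B_keys_nodup l) 0, B_keys l]
  simp only [List.mem_map, PySem.Set.mem_ofList]
  constructor
  · rintro ⟨v, hv, rfl⟩
    rcases B_getD l v hv with ⟨k, hk, he⟩
    rcases (lastIdx_eq_some_iff v l k).1 hk with ⟨h1, h2, h3⟩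
    exact ⟨k, he.symm ▸ rfl, h1, by rw [h2]; exact h3⟩
  · rintro ⟨k, rfl, hk, hall⟩
    refine ⟨l.getD k 0, ?_, ?_⟩
    · rw [List.getD_eq_getElem l 0 hk]; exact List.getElem_mem hk
    · have hk' : lastIdx l (l.getD k 0) = some k :=
        (lastIdx_eq_some_iff (l.getD k 0) l k).2 ⟨hk, rfl, hall⟩
      rcases B_getD l (l.getD k 0) (by rw [List.getD_eq_getElem l 0 hk]; exact List.getElem_mem hk)
        with ⟨k', hk'', he⟩
      rw [hk'] at hk''; injection hk'' with hk''; subst hk''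
      exact he

theorem B_values_nodup (l : List Int) :
    ((PySem.List.enumerate l).foldl
      (fun (d : PySem.Dict Int Int) p => d.insert p.2 p.1) PySem.Dict.empty).values.Nodup := by
  rw [PySem.Dict.values_eq_map_keys _ (B_keys_nodup l) 0]
  refine List.Nodup.map_on ?_ ?_
  · intro v hv w hw he
    rw [B_keys l, PySem.Set.mem_ofList] at hv hw
    rcases B_getD l v hv with ⟨k1, hk1, he1⟩
    rcases B_getD l w hw with ⟨k2, hk2, he2⟩
    rw [he1, he2] at he
    have : k1 = k2 := by exact_mod_cast he
    subst this
    rcases (lastIdx_eq_some_iff v l k1).1 hk1 with ⟨-, h2, -⟩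
    rcases (lastIdx_eq_some_iff w l k1).1 hk2 with ⟨-, h2', -⟩
    rw [← h2, ← h2']
  · rw [B_keys l]; exact PySem.Set.nodup_ofList l

-- ===== VERDICT (by name: the statement is the Claim_ definition above) =====
theorem compute_keyroots_py_spec : Claim_equal_compute_keyroots_py := by
  intro l _
  unfold Spec_compute_keyroots_py compute_keyroots_py_alt
  refine (PySem.List.sorted_eq_of_perm_of_pairwise_lt _ _ _ ?_ ?_).symm
  · refine (List.perm_ext_iff_of_nodup (A_nodup l) (B_values_nodup l)).2 ?_
    intro j
    rw [mem_A_iff, mem_B_iff]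
  · exact A_pairwise l
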